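-- pv_equiv track=rewrite | github.com/MinJunKimKR/practice-programming | codingTest/programmers/highScoreKit/DP/3_expressionN.py | solution
-- ===== SOURCE A (Python) =====
-- def solution(N, number):
--     if N == number:
--         return 1
--     numberSet = [[]] + [[int(str(N) * i)] for i in range(1, 9)]
--     for i in range(1, 9):
--         if numberSet[i][0] == number:
--             return i
--     for i in range(2, 9):
--         for j in range(1, i):
--             for a in numberSet[j]:
--                 for b in numberSet[i-j]:
--                     numberSet[i].append(a+b)
--                     numberSet[i].append(a*b)
--                     numberSet[i].append(a-b)
--                     if b != 0:
--                         numberSet[i].append(a//b)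
--         if numberSet[i].count(number) > 0:
--             return i
--         numberSet[i] = set(numberSet[i])
--     return -1
-- ===== SOURCE B (Python) =====
-- def solution(N, number):
--     if N == number:
--         return 1
--     for k in range(1, 9):
--         if int(str(N) * k) == number:
--             return k
--     memo = {}
--
--     def reach(k):
--         if k in memo:
--             return memo[k]
--         s = {int(str(N) * k)}
--         for j in range(1, k):
--             for a in reach(j):
--                 for b in reach(k - j):
--                     s.add(a + b)
--                     s.add(a * b)
--                     s.add(a - b)
--                     if b != 0:
--                         s.add(a // b)
--         memo[k] = frozenset(s)
--         return memo[k]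
--
--     for k in range(2, 9):
--         if number in reach(k):
--             return k
--     return -1
-- ===== Notes on version B (the rewrite author's own statement) =====
-- stated objective: alternative
-- what changed: A's iterative DP table of duplicate-laden lists (deduplicated into a set only after each level's membership scan via count) is replaced by a memoized recursion reach(k) that returns the frozenset of values expressible with exactly k copies of N, combining reach(j) x reach(k-j); the pure-concatenation pre-check and the floor-division/b!=0 semantics are kept exactly.
import Mathlib
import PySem

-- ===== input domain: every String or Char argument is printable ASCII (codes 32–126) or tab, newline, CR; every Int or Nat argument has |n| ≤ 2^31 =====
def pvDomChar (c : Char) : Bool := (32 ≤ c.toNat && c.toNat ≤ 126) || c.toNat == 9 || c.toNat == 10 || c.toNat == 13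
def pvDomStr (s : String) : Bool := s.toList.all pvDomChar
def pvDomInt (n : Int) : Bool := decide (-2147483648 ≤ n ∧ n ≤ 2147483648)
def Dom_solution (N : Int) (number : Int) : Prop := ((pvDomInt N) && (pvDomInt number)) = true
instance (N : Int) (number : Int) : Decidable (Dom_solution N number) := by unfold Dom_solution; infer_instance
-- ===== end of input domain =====

-- B replaces A's iterative table of duplicate-laden lists by a memoized recursion over
-- frozensets of the values expressible with exactly k copies of N (objective: alternative).

-- ===== PORT A =====
-- int(str(N) * i); the .getD 0 branch is unreachable under Pre_solution (0 ≤ N, so the parse succeeds)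
def pvRep (N : Int) (i : Nat) : Int :=
  (PySem.Int.ofStr? (String.ofList (List.flatten (List.replicate i (PySem.Int.toStr N).toList)))).getD 0

-- numberSet = [[]] + [[int(str(N)*i)] for i in range(1, 9)]  (range(1,9) as List.range' 1 8 : all indices nonnegative, exact)
def pvTable0 (N : Int) : List (List Int) :=
  [[]] ++ (List.range' 1 8).map (fun i => [pvRep N i])

-- for i in range(1,9): if numberSet[i][0] == number: return i   (indices 1..8 and 0 are in range)
def pvScanA (table : List (List Int)) (number : Int) : List Nat → Option Int
  | [] => none
  | i :: rest =>
      if (table.getD i []).getD 0 0 = number then some (i : Int) else pvScanA table number rest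

-- the body of A's level-i pass: the four appends over j in range(1,i), a in numberSet[j], b in numberSet[i-j]
-- (list.append is ported as cons plus one final reverse — the same list as Python's appends, O(1) per append)
def pvBuild (table : List (List Int)) (i : Nat) : List Int :=
  table.getD i [] ++
  ((List.range' 1 (i - 1)).foldl (fun c j =>
    (table.getD j []).foldl (fun c a =>
      (table.getD (i - j) []).foldl (fun c b =>
        let c := (a + b) :: c
        let c := (a * b) :: c
        let c := (a - b) :: c
        if b ≠ 0 then PySem.Int.floordiv a b :: c else c) c) c) []).reverse

-- for i in range(2,9): build, then 'if numberSet[i].count(number) > 0: return i', then numberSet[i] = set(numberSet[i]);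
-- Python's set is hash-based, so set(cur) is ported as a hash set (same distinct elements; a Python set's
-- iteration order is unspecified and never affects the returned Int)
def pvLoopA (number : Int) : List (List Int) → List Nat → Int
  | _, [] => -1
  | table, i :: rest =>
      let cur := pvBuild table i
      if 0 < PySem.List.count cur number then (i : Int)
      else pvLoopA number (table.set i ((Std.HashSet.ofList cur).toList)) rest

def solution (N : Int) (number : Int) : Int :=
  if N = number then 1
  else
    let numberSet := pvTable0 N
    match pvScanA numberSet number (List.range' 1 8) with
    | some i => i
    | none => pvLoopA number numberSet (List.range' 2 7)

-- ===== PORT B =====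
-- for k in range(1,9): if int(str(N)*k) == number: return k
def pvScanB (N : Int) (number : Int) : List Nat → Option Int
  | [] => none
  | k :: rest => if pvRep N k = number then some (k : Int) else pvScanB N number rest

-- the body of reach(k): combine the already-memoised reach(j), reach(k-j) (memo.getD (j-1) is memo[j];
-- Python's set is hash-based, so it is ported as a hash set — iteration order is unspecified in Python
-- and never affects the returned Int)
def pvReachStep (N : Int) (memo : List (Std.HashSet Int)) (k : Nat) : Std.HashSet Int :=
  (List.range' 1 (k - 1)).foldl
    (fun s j =>
      ((memo.getD (j - 1) ∅).toList).foldl (fun s a =>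
        ((memo.getD (k - j - 1) ∅).toList).foldl (fun s b =>
          let s := s.insert (a + b)
          let s := s.insert (a * b)
          let s := s.insert (a - b)
          if b ≠ 0 then s.insert (PySem.Int.floordiv a b) else s) s) s)
    (Std.HashSet.ofList [pvRep N k])

-- B's memo dict: reach(1), …, reach(k) are filled in exactly this order by the memoised recursion
def pvMemo (N : Int) : Nat → List (Std.HashSet Int)
  | 0 => []
  | k + 1 => let memo := pvMemo N k
             memo ++ [pvReachStep N memo (k + 1)]

-- reach(k) = memo[k]
def pvReach (N : Int) (k : Nat) : Std.HashSet Int :=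
  (pvMemo N k).getD (k - 1) ∅

-- for k in range(2,9): if number in reach(k): return k
def pvLoopB (N : Int) (number : Int) : List Nat → Int
  | [] => -1
  | k :: rest => if (pvReach N k).contains number then (k : Int) else pvLoopB N number rest

def solution_alt (N : Int) (number : Int) : Int :=
  if N = number then 1
  else
    match pvScanB N number (List.range' 1 8) with
    | some k => k
    | none => pvLoopB N number (List.range' 2 7)

-- ===== PRECONDITION & SPEC =====
-- For N < 0 with N ≠ number both programs raise ValueError at int(str(N)*k) for k ≥ 2; Pre_ excludes exactly those crashes.
def Pre_solution (N : Int) (number : Int) : Prop := 0 ≤ N ∨ N = number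
instance (N : Int) (number : Int) : Decidable (Pre_solution N number) := by
  unfold Pre_solution; infer_instance
def pvWitness_solution : Int × Int := (5, 12)

def Spec_solution (N : Int) (number : Int) (out : Int) : Prop := out = solution_alt N number
instance (N : Int) (number : Int) (out : Int) : Decidable (Spec_solution N number out) := by
  unfold Spec_solution; infer_instance

-- ===== CLAIM (what is proved, stated in full; the proofs are below) =====
def Claim_equal_solution : Prop := ∀ (N : Int) (number : Int), Dom_solution N number → Pre_solution N number → Spec_solution N number (solution N number)

-- ===== LEMMAS AND PROOFS =====

-- the per-pair contribution of A's four appends / B's four set-adds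
def pvP (a b x : Int) : Prop :=
  x = a + b ∨ x = a * b ∨ x = a - b ∨ (b ≠ 0 ∧ x = PySem.Int.floordiv a b)

theorem pv_mem_foldl_iff {σ β : Type} (memf : Int → σ → Prop) (g : σ → β → σ) (P : β → Int → Prop)
    (h : ∀ s v x, memf x (g s v) ↔ memf x s ∨ P v x) :
    ∀ (l : List β) (s : σ) (x : Int), memf x (l.foldl g s) ↔ memf x s ∨ ∃ v ∈ l, P v x := by
  intro l
  induction l with
  | nil => simp
  | cons v t ih =>
      intro s x
      simp only [List.foldl_cons, ih, h, List.mem_cons]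
      constructor
      · rintro ((hs | hp) | ⟨w, hw, hpw⟩)
        · exact Or.inl hs
        · exact Or.inr ⟨v, Or.inl rfl, hp⟩
        · exact Or.inr ⟨w, Or.inr hw, hpw⟩
      · rintro (hs | ⟨w, (rfl | hw), hpw⟩)
        · exact Or.inl (Or.inl hs)
        · exact Or.inl (Or.inr hpw)
        · exact Or.inr ⟨w, hw, hpw⟩

theorem pv_mem_build (table : List (List Int)) (i : Nat) (x : Int) :
    x ∈ pvBuild table i ↔ x ∈ table.getD i [] ∨
      ∃ j ∈ List.range' 1 (i - 1), ∃ a ∈ table.getD j [],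
        ∃ b ∈ table.getD (i - j) [], pvP a b x := by
  unfold pvBuild
  rw [List.mem_append, List.mem_reverse]
  rw [pv_mem_foldl_iff (fun x c => x ∈ c) _
    (fun j x => ∃ a ∈ table.getD j [], ∃ b ∈ table.getD (i - j) [], pvP a b x)]
  · simp
  intro c j x
  rw [pv_mem_foldl_iff (fun x c => x ∈ c) _
    (fun a x => ∃ b ∈ table.getD (i - j) [], pvP a b x)]
  intro c a x
  rw [pv_mem_foldl_iff (fun x c => x ∈ c) _ (fun b x => pvP a b x)]
  intro c b x
  by_cases hb : b = 0
  · simp [hb, pvP, List.mem_cons]; tauto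
  · simp only [hb, ne_eq, not_false_eq_true, ite_true, pvP, List.mem_cons]
    tauto

theorem pv_memo_length (N : Int) : ∀ k, (pvMemo N k).length = k := by
  intro k
  induction k with
  | zero => rfl
  | succ k ih => simp [pvMemo, ih]

theorem pv_memo_getD (N : Int) :
    ∀ (k j : Nat), 1 ≤ j → j ≤ k → (pvMemo N k).getD (j - 1) ∅ = pvReach N j := by
  intro k
  induction k with
  | zero => intro j h1 h2; omega
  | succ k ih =>
      intro j h1 h2
      by_cases hj : j ≤ k
      · show (pvMemo N (k + 1)).getD (j - 1) ∅ = pvReach N j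
        rw [pvMemo]
        rw [List.getD_eq_getElem?_getD, List.getElem?_append_left (by
          simpa [pv_memo_length] using (by omega : j - 1 < k))]
        rw [← List.getD_eq_getElem?_getD]
        exact ih j h1 hj
      · have : j = k + 1 := by omega
        subst this
        rfl

theorem pv_reach_eq_step (N : Int) (k : Nat) (hk : 1 ≤ k) :
    pvReach N k = pvReachStep N (pvMemo N (k - 1)) k := by
  obtain ⟨m, rfl⟩ : ∃ m, k = m + 1 := ⟨k - 1, by omega⟩
  show (pvMemo N (m + 1)).getD m ∅ = _
  rw [pvMemo]
  rw [List.getD_eq_getElem?_getD, List.getElem?_append_right (by simp [pv_memo_length])]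
  simp [pv_memo_length]

theorem pv_mem_reach (N : Int) (k : Nat) (hk : 1 ≤ k) (x : Int) :
    x ∈ pvReach N k ↔ x = pvRep N k ∨
      ∃ j ∈ List.range' 1 (k - 1), ∃ a ∈ pvReach N j,
        ∃ b ∈ pvReach N (k - j), pvP a b x := by
  rw [pv_reach_eq_step N k hk]
  unfold pvReachStep
  rw [pv_mem_foldl_iff (fun x (s : Std.HashSet Int) => x ∈ s) _
    (fun j x => ∃ a ∈ (pvMemo N (k - 1)).getD (j - 1) ∅,
      ∃ b ∈ (pvMemo N (k - 1)).getD (k - j - 1) ∅, pvP a b x)]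
  · constructor
    · rintro (hx | ⟨j, hj, a, ha, b, hb, hp⟩)
      · refine Or.inl ?_
        rw [Std.HashSet.mem_ofList] at hx
        simpa using hx
      · have hjb := List.mem_range'.1 hj
        refine Or.inr ⟨j, hj, a, ?_, b, ?_, hp⟩
        · rwa [pv_memo_getD N (k - 1) j (by omega) (by omega)] at ha
        · rwa [pv_memo_getD N (k - 1) (k - j) (by omega) (by omega)] at hb
    · rintro (hx | ⟨j, hj, a, ha, b, hb, hp⟩)
      · refine Or.inl ?_
        rw [Std.HashSet.mem_ofList]
        simpa using hx
      · have hjb := List.mem_range'.1 hj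
        refine Or.inr ⟨j, hj, a, ?_, b, ?_, hp⟩
        · rwa [pv_memo_getD N (k - 1) j (by omega) (by omega)]
        · rwa [pv_memo_getD N (k - 1) (k - j) (by omega) (by omega)]
  · intro s j x
    rw [pv_mem_foldl_iff (fun x (s : Std.HashSet Int) => x ∈ s) _
      (fun a x => ∃ b ∈ (pvMemo N (k - 1)).getD (k - j - 1) ∅, pvP a b x)]
    · constructor
      · rintro (hs | ⟨a, ha, hp⟩)
        · exact Or.inl hs
        · exact Or.inr ⟨a, (Std.HashSet.mem_toList).1 ha, hp⟩
      · rintro (hs | ⟨a, ha, hp⟩)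
        · exact Or.inl hs
        · exact Or.inr ⟨a, (Std.HashSet.mem_toList).2 ha, hp⟩
    intro s a x
    rw [pv_mem_foldl_iff (fun x (s : Std.HashSet Int) => x ∈ s) _ (fun b x => pvP a b x)]
    · constructor
      · rintro (hs | ⟨b, hb, hp⟩)
        · exact Or.inl hs
        · exact Or.inr ⟨b, (Std.HashSet.mem_toList).1 hb, hp⟩
      · rintro (hs | ⟨b, hb, hp⟩)
        · exact Or.inl hs
        · exact Or.inr ⟨b, (Std.HashSet.mem_toList).2 hb, hp⟩
    intro s b x
    by_cases hb : b = 0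
    · simp only [hb, ne_eq, not_true_eq_false, if_false, pvP, Std.HashSet.mem_insert, beq_iff_eq]
      tauto
    · simp only [hb, ne_eq, not_false_eq_true, if_true, pvP, Std.HashSet.mem_insert, beq_iff_eq]
      constructor
      · rintro (rfl | rfl | rfl | rfl | hs) <;> tauto
      · rintro (hs | rfl | rfl | rfl | ⟨-, rfl⟩) <;> tauto

-- the invariant A's table satisfies before processing level i
def pvInv (N : Int) (table : List (List Int)) (i : Nat) : Prop :=
  table.length = 9 ∧
  (∀ j, 1 ≤ j → j < i → ∀ x, x ∈ table.getD j [] ↔ x ∈ pvReach N j) ∧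
  (∀ j, i ≤ j → j ≤ 8 → table.getD j [] = [pvRep N j])

theorem pv_table0_getD (N : Int) (j : Nat) (h1 : 1 ≤ j) (h8 : j ≤ 8) :
    (pvTable0 N).getD j [] = [pvRep N j] := by
  interval_cases j <;> rfl

theorem pv_inv_init (N : Int) : pvInv N (pvTable0 N) 2 := by
  refine ⟨rfl, ?_, ?_⟩
  · intro j h1 h2 x
    have hj : j = 1 := by omega
    subst hj
    rw [pv_table0_getD N 1 (by omega) (by omega)]
    rw [pv_mem_reach N 1 (by omega)]
    simp
  · intro j h1 h2; exact pv_table0_getD N j (by omega) h2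

theorem pv_getD_set_ne (l : List (List Int)) (i j : Nat) (v : List Int) (h : i ≠ j) :
    (l.set i v).getD j [] = l.getD j [] := by
  simp [List.getD_eq_getElem?_getD, List.getElem?_set_ne h]

theorem pv_getD_set_self (l : List (List Int)) (i : Nat) (v : List Int) (h : i < l.length) :
    (l.set i v).getD i [] = v := by
  simp [List.getD_eq_getElem?_getD, List.getElem?_set_self (by simpa using h)]

theorem pv_mem_build_reach (N : Int) (table : List (List Int)) (i : Nat)
    (hinv : pvInv N table i) (h2 : 2 ≤ i) (h8 : i ≤ 8) (x : Int) :
    x ∈ pvBuild table i ↔ x ∈ pvReach N i := by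
  obtain ⟨-, hlt, hge⟩ := hinv
  rw [pv_mem_build, pv_mem_reach N i (by omega), hge i (le_refl i) h8]
  constructor
  · rintro (hx | ⟨j, hj, a, ha, b, hb, hp⟩)
    · exact Or.inl (by simpa using hx)
    · have hjb := List.mem_range'.1 hj
      refine Or.inr ⟨j, hj, a, ?_, b, ?_, hp⟩
      · exact (hlt j (by omega) (by omega) a).1 ha
      · exact (hlt (i - j) (by omega) (by omega) b).1 hb
  · rintro (hx | ⟨j, hj, a, ha, b, hb, hp⟩)
    · exact Or.inl (by simpa using hx)
    · have hjb := List.mem_range'.1 hj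
      refine Or.inr ⟨j, hj, a, ?_, b, ?_, hp⟩
      · exact (hlt j (by omega) (by omega) a).2 ha
      · exact (hlt (i - j) (by omega) (by omega) b).2 hb

theorem pv_loop_eq (N number : Int) :
    ∀ (l : List Nat) (i : Nat) (table : List (List Int)),
      l = List.range' i (9 - i) → 2 ≤ i → pvInv N table i →
      pvLoopA number table l = pvLoopB N number l := by
  intro l
  induction l with
  | nil => intro i table _ _ _; rfl
  | cons k rest ih =>
      intro i table hl h2 hinv
      have hi9 : i ≤ 8 := by
        by_contra h
        have h0 : 9 - i = 0 := by omega
        rw [h0] at hl; simp at hl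
      have hrange : List.range' i (9 - i) = i :: List.range' (i + 1) (9 - (i + 1)) := by
        have : 9 - i = (9 - (i + 1)) + 1 := by omega
        rw [this, List.range'_succ]
      rw [hrange] at hl
      obtain ⟨hk, hrest⟩ : k = i ∧ rest = List.range' (i + 1) (9 - (i + 1)) := by
        exact ⟨(List.cons.injEq ..).mp hl |>.1, (List.cons.injEq ..).mp hl |>.2⟩
      subst hk
      have hmem : (0 < PySem.List.count (pvBuild table k) number) ↔ number ∈ pvReach N k := by
        rw [PySem.List.count_eq, List.count_pos_iff]
        exact pv_mem_build_reach N table k hinv h2 hi9 number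
      show (let cur := pvBuild table k
            if 0 < PySem.List.count cur number then (k : Int)
            else pvLoopA number (table.set k ((Std.HashSet.ofList cur).toList)) rest)
          = pvLoopB N number (k :: rest)
      rw [pvLoopB]
      by_cases hnum : number ∈ pvReach N k
      · rw [if_pos (hmem.2 hnum), if_pos (by simpa [Std.HashSet.contains_iff_mem] using hnum)]
      · have hcnt : ¬ (0 < PySem.List.count (pvBuild table k) number) := fun h => hnum (hmem.1 h)
        rw [if_neg hcnt, if_neg (by simpa [Std.HashSet.contains_iff_mem] using hnum)]
        apply ih (k + 1) _ hrest (by omega)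
        obtain ⟨hlen, hlt, hge⟩ := hinv
        refine ⟨by simpa using hlen, ?_, ?_⟩
        · intro j h1 hj x
          by_cases hjk : j = k
          · subst hjk
            rw [pv_getD_set_self table j _ (by omega)]
            rw [Std.HashSet.mem_toList, Std.HashSet.mem_ofList, List.contains_iff_mem]
            exact pv_mem_build_reach N table j ⟨hlen, hlt, hge⟩ h2 hi9 x
          · rw [pv_getD_set_ne table k j _ (fun h => hjk h.symm)]
            exact hlt j h1 (by omega) x
        · intro j hj h8
          rw [pv_getD_set_ne table k j _ (by omega)]
          exact hge j (by omega) h8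

theorem pv_scan_eq (N number : Int) :
    pvScanA (pvTable0 N) number (List.range' 1 8) = pvScanB N number (List.range' 1 8) := by
  simp only [List.range']
  simp [pvScanA, pvScanB, pvTable0]

-- ===== VERDICT (by name: the statement is the Claim_ definition above) =====
theorem solution_spec : Claim_equal_solution := by
  intro N number _ _
  unfold Spec_solution solution solution_alt
  by_cases hN : N = number
  · simp [hN]
  · simp only [if_neg hN, pv_scan_eq]
    cases pvScanB N number (List.range' 1 8) with
    | some k => rfl
    | none =>
        exact pv_loop_eq N number (List.range' 2 7) 2 (pvTable0 N) rfl (by omega) (pv_inv_init N)
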